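-- pv_equiv track=rewrite | github.com/jistr/rejviz | rejviz/nic_mappings.py | _convert_nic_mappings_args
-- ===== SOURCE A (Python) =====
-- def _convert_nic_mappings_args(args, mapped_nics):
--     def get_nic_names(manual_mappings):
--         keyvals = manual_mappings.split(',')
--         return [keyval.split('=', 1)[0] for keyval in keyvals]
--
--     inserted_nic_names = set()
--
--     # convert manual mappings
--     converted_manual = []
--     args_iter = iter(args)
--     for arg in args_iter:
--         if arg == '--nic-mappings':
--             mappings_value = next(args_iter)
--             nic_names = get_nic_names(mappings_value)
--             inserted_nic_names = inserted_nic_names.union(set(nic_names))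
--             converted_manual.extend(_network_args(nic_names, mapped_nics))
--         else:
--             converted_manual.append(arg)
--
--     # convert automatic mappings
--     converted_auto = []
--     for arg in converted_manual:
--         if arg == '--auto-nic-mappings':
--             all_nic_names = set(nic['name'] for nic in mapped_nics)
--             names_to_insert = all_nic_names.difference(inserted_nic_names)
--             inserted_nic_names = inserted_nic_names.union(names_to_insert)
--             converted_auto.extend(_network_args(names_to_insert, mapped_nics))
--         else:
--             converted_auto.append(arg)
--
--     return converted_auto
--
-- def _network_args(nic_names, mapped_nics):
--     args = []
--
--     for nic_name in nic_names:
--         nic = _nic_by_name(nic_name, mapped_nics)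
--         args.append('--network')
--         args.append('network=%(libvirt_network)s,mac=%(hwaddr)s,model=virtio'
--                     % nic)
--
--     return args
--
-- def _nic_by_name(nic_name, nics):
--     for nic in nics:
--         if nic['name'] == nic_name:
--             return nic
--     raise ValueError("NIC with name '%s' not found" % nic_name)
-- ===== SOURCE B (Python) =====
-- def _convert_nic_mappings_args(args, mapped_nics):
--     MANUAL = '--nic-mappings'
--     AUTO = '--auto-nic-mappings'
--
--     def nic_names_of(value):
--         return [kv.split('=', 1)[0] for kv in value.split(',')]
--
--     # pass 1: collect every manually mapped NIC name from the original args
--     inserted = set()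
--     skip = False
--     for i, arg in enumerate(args):
--         if skip:
--             skip = False
--         elif arg == MANUAL:
--             inserted = inserted.union(set(nic_names_of(args[i + 1])))
--             skip = True
--
--     # pass 2: rebuild the argument list in ONE walk over the original args
--     out = []
--     skip = False
--     auto_done = False
--     for i, arg in enumerate(args):
--         if skip:
--             skip = False
--         elif arg == MANUAL:
--             out.extend(_network_args(nic_names_of(args[i + 1]), mapped_nics))
--             skip = True
--         elif arg == AUTO:
--             if not auto_done:
--                 names = set(nic['name'] for nic in mapped_nics).difference(inserted)
--                 out.extend(_network_args(names, mapped_nics))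
--                 auto_done = True
--         else:
--             out.append(arg)
--     return out
--
--
-- def _network_args(nic_names, mapped_nics):
--     args = []
--     for nic_name in nic_names:
--         nic = _nic_by_name(nic_name, mapped_nics)
--         args.append('--network')
--         args.append('network=%(libvirt_network)s,mac=%(hwaddr)s,model=virtio'
--                     % nic)
--     return args
--
--
-- def _nic_by_name(nic_name, nics):
--     for nic in nics:
--         if nic['name'] == nic_name:
--             return nic
--     raise ValueError("NIC with name '%s' not found" % nic_name)
-- ===== Notes on version B (the rewrite author's own statement) =====
-- stated objective: alternative
-- what changed: Replaces A's pipeline (iterator pass building an intermediate converted_manual list, then a second pass over that transformed list) with two index-based passes over the ORIGINAL args: pass 1 only collects the manually mapped NIC names, pass 2 rebuilds the output in one walk, expanding '--nic-mappings' inline and expanding the set difference at the first '--auto-nic-mappings' while dropping later ones, so the intermediate list disappears.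
import Mathlib
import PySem

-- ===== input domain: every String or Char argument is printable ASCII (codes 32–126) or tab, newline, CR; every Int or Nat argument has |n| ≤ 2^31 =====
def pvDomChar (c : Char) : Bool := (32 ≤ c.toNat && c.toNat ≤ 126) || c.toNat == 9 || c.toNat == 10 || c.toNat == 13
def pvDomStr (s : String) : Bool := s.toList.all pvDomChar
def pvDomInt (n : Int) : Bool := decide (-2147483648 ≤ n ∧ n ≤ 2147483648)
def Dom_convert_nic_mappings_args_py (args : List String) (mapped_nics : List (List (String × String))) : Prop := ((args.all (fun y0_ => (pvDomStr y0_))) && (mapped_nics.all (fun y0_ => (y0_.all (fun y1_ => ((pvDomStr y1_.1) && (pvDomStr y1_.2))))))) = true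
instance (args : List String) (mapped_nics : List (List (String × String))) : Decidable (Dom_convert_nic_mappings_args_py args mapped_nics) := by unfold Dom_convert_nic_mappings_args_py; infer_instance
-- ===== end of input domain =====

-- B rebuilds the output in one walk over the ORIGINAL args (auto handled by a flag) instead of A's
-- intermediate converted_manual list; same cost, different decomposition (objective: alternative).

-- ===== PORT A =====

-- hand port of the '%' formatting line: exact for '%(k)s' substitution of string dict values
def fmt_network (lv hw : String) : String :=
  String.ofList ("network=".toList ++ lv.toList ++ ",mac=".toList ++ hw.toList ++ ",model=virtio".toList)

-- get_nic_names: keyval.split('=', 1)[0] equals keyval.split('=')[0]; split? is `some` since both separators are nonempty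
def get_nic_names_py (v : String) : List String :=
  ((PySem.Str.split? v ",").getD []).map (fun kv => ((PySem.Str.split? kv "=").getD [kv]).headD kv)

-- _nic_by_name: none = ValueError (no match) or KeyError (a scanned nic lacks 'name')
def nic_by_name_py (n : String) : List (List (String × String)) → Option (List (String × String))
  | [] => none
  | nic :: rest =>
    match (PySem.Dict.mk nic).get? "name" with
    | none => none
    | some v => if v = n then some nic else nic_by_name_py n rest

-- _network_args: none = propagated ValueError/KeyError
def network_args_py (mapped_nics : List (List (String × String))) : List String → Option (List String)
  | [] => some []
  | n :: ns =>
    match nic_by_name_py n mapped_nics with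
    | none => none
    | some nic =>
      match (PySem.Dict.mk nic).get? "libvirt_network", (PySem.Dict.mk nic).get? "hwaddr" with
      | some lv, some hw =>
        match network_args_py mapped_nics ns with
        | none => none
        | some rest => some ("--network" :: fmt_network lv hw :: rest)
      | _, _ => none

-- set(nic['name'] for nic in mapped_nics): none = KeyError
def all_nic_names_py : List (List (String × String)) → Option (List String)
  | [] => some []
  | nic :: rest =>
    match (PySem.Dict.mk nic).get? "name" with
    | none => none
    | some n =>
      match all_nic_names_py rest with
      | none => none
      | some ns => some (n :: ns)

-- A's first loop (iterator with next(): none = StopIteration or a raise from _network_args)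
def loop1_A (mapped_nics : List (List (String × String))) :
    List String → PySem.Set String → List String → Option (PySem.Set String × List String)
  | [], ins, acc => some (ins, acc)
  | arg :: rest, ins, acc =>
    if arg = "--nic-mappings" then
      match rest with
      | [] => none
      | v :: rest' =>
        match network_args_py mapped_nics (get_nic_names_py v) with
        | none => none
        | some na =>
          loop1_A mapped_nics rest' (PySem.Set.union ins (PySem.Set.ofList (get_nic_names_py v))) (acc ++ na)
    else loop1_A mapped_nics rest ins (acc ++ [arg])

-- A's second loop over converted_manual
def loop2_A (mapped_nics : List (List (String × String))) :
    List String → PySem.Set String → List String → Option (List String)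
  | [], _, acc => some acc
  | arg :: rest, ins, acc =>
    if arg = "--auto-nic-mappings" then
      match all_nic_names_py mapped_nics with
      | none => none
      | some allN =>
        match network_args_py mapped_nics (PySem.Set.diff (PySem.Set.ofList allN) ins) with
        | none => none
        | some na =>
          loop2_A mapped_nics rest (PySem.Set.union ins (PySem.Set.diff (PySem.Set.ofList allN) ins)) (acc ++ na)
    else loop2_A mapped_nics rest ins (acc ++ [arg])

def convert_nic_mappings_args_py (args : List String) (mapped_nics : List (List (String × String))) : List String :=
  match loop1_A mapped_nics args PySem.Set.empty [] with
  | none => []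
  | some (ins, converted_manual) => (loop2_A mapped_nics converted_manual ins []).getD []

-- ===== PORT B =====

-- B pass 1: collect manually mapped names (skip flag mirrors Source B; none = IndexError on args[i+1])
def pass1_B : List String → Bool → PySem.Set String → Option (PySem.Set String)
  | [], _, ins => some ins
  | arg :: rest, skip, ins =>
    if skip then pass1_B rest false ins
    else if arg = "--nic-mappings" then
      match rest.head? with
      | none => none
      | some v => pass1_B rest true (PySem.Set.union ins (PySem.Set.ofList (get_nic_names_py v)))
    else pass1_B rest false ins

-- B pass 2: one walk over the original args; `done` = auto_done
def pass2_B (mapped_nics : List (List (String × String))) (ins : PySem.Set String) :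
    List String → Bool → Bool → List String → Option (List String)
  | [], _, _, out => some out
  | arg :: rest, skip, done, out =>
    if skip then pass2_B mapped_nics ins rest false done out
    else if arg = "--nic-mappings" then
      match rest.head? with
      | none => none
      | some v =>
        match network_args_py mapped_nics (get_nic_names_py v) with
        | none => none
        | some na => pass2_B mapped_nics ins rest true done (out ++ na)
    else if arg = "--auto-nic-mappings" then
      if done then pass2_B mapped_nics ins rest false done out
      else
        match all_nic_names_py mapped_nics with
        | none => none
        | some allN =>
          match network_args_py mapped_nics (PySem.Set.diff (PySem.Set.ofList allN) ins) with
          | none => none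
          | some na => pass2_B mapped_nics ins rest false true (out ++ na)
    else pass2_B mapped_nics ins rest false done (out ++ [arg])

def convert_nic_mappings_args_py_alt (args : List String) (mapped_nics : List (List (String × String))) : List String :=
  match pass1_B args false PySem.Set.empty with
  | none => []
  | some ins => (pass2_B mapped_nics ins args false false []).getD []

-- ===== PRECONDITION & SPEC =====

def pvManualValues (args : List String) : List String :=
  (List.range args.length).filterMap (fun i =>
    if args.getD i "" = "--nic-mappings" then some (args.getD (i + 1) "") else none)

def pvManualNames (args : List String) : List String :=
  (pvManualValues args).flatMap get_nic_names_py

-- closed form of "the first nic whose 'name' is n exists, has both format keys, and every nic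
-- scanned before it has a 'name' key (and a different one)"
def pvNicOK (n : String) (mapped_nics : List (List (String × String))) : Bool :=
  (List.range mapped_nics.length).any (fun i =>
    ((PySem.Dict.mk (mapped_nics.getD i [])).get? "name" == some n)
    && ((PySem.Dict.mk (mapped_nics.getD i [])).get? "libvirt_network").isSome
    && ((PySem.Dict.mk (mapped_nics.getD i [])).get? "hwaddr").isSome
    && (List.range i).all (fun j =>
        ((PySem.Dict.mk (mapped_nics.getD j [])).get? "name").isSome
        && !((PySem.Dict.mk (mapped_nics.getD j [])).get? "name" == some n)))

def pvAutoTriggered (args : List String) : Bool :=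
  (List.range args.length).any (fun i =>
    args.getD i "" == "--auto-nic-mappings" && (i == 0 || !(args.getD (i - 1) "" == "--nic-mappings")))

def pvToInsert (args : List String) (mapped_nics : List (List (String × String))) : List String :=
  PySem.Set.diff
    (PySem.Set.ofList (mapped_nics.filterMap (fun nic => (PySem.Dict.mk nic).get? "name")))
    (pvManualNames args)

-- Pre_ excludes: inputs where A raises (a '--nic-mappings' without a following value token → StopIteration,
-- an unknown NIC name → ValueError, a nic dict missing 'name'/'libvirt_network'/'hwaddr' where read → KeyError);
-- inputs where an '--auto-nic-mappings' expansion inserts two or more NIC names, whose output order is Python's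
-- hash-dependent set-iteration order, so neither order is specifiable; and args where the value token following
-- '--nic-mappings' is itself '--nic-mappings' (a flag used as its own value — excluded to keep Pre_ closed-form).
def Pre_convert_nic_mappings_args_py (args : List String) (mapped_nics : List (List (String × String))) : Prop :=
  (∀ i ∈ List.range args.length, args.getD i "" = "--nic-mappings" →
      i + 1 < args.length ∧ args.getD (i + 1) "" ≠ "--nic-mappings")
  ∧ (∀ n ∈ pvManualNames args, pvNicOK n mapped_nics = true)
  ∧ (pvAutoTriggered args = true →
      (∀ nic ∈ mapped_nics, ((PySem.Dict.mk nic).get? "name").isSome = true)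
      ∧ (pvToInsert args mapped_nics).length ≤ 1
      ∧ (∀ n ∈ pvToInsert args mapped_nics, pvNicOK n mapped_nics = true))

instance (args : List String) (mapped_nics : List (List (String × String))) : Decidable (Pre_convert_nic_mappings_args_py args mapped_nics) := by
  unfold Pre_convert_nic_mappings_args_py; infer_instance

def pvWitness_convert_nic_mappings_args_py : List String × (List (List (String × String))) :=
  (["--nic-mappings", "eth0", "--auto-nic-mappings"],
   [[("name", "eth0"), ("libvirt_network", "default"), ("hwaddr", "52:54:00:aa:bb:cc")],
    [("name", "eth1"), ("libvirt_network", "net1"), ("hwaddr", "52:54:00:dd:ee:ff")]])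

def Spec_convert_nic_mappings_args_py (args : List String) (mapped_nics : List (List (String × String))) (out : List String) : Prop := out = convert_nic_mappings_args_py_alt args mapped_nics
instance (args : List String) (mapped_nics : List (List (String × String))) (out : List String) : Decidable (Spec_convert_nic_mappings_args_py args mapped_nics out) := by unfold Spec_convert_nic_mappings_args_py; infer_instance

-- ===== CLAIM (what is proved, stated in full; the proofs are below) =====
def Claim_equal_convert_nic_mappings_args_py : Prop := ∀ (args : List String) (mapped_nics : List (List (String × String))), Dom_convert_nic_mappings_args_py args mapped_nics → Pre_convert_nic_mappings_args_py args mapped_nics → Spec_convert_nic_mappings_args_py args mapped_nics (convert_nic_mappings_args_py args mapped_nics)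

-- ===== LEMMAS AND PROOFS =====

-- proof-only: the manual-expansion part of A's first loop, without the inserted-names state
def expAll (mapped_nics : List (List (String × String))) : List String → Option (List String)
  | [] => some []
  | arg :: rest =>
    if arg = "--nic-mappings" then
      match rest with
      | [] => none
      | v :: rest' =>
        match network_args_py mapped_nics (get_nic_names_py v) with
        | none => none
        | some na => (expAll mapped_nics rest').map (na ++ ·)
    else (expAll mapped_nics rest).map (arg :: ·)

theorem fmt_ne_auto (lv hw : String) : fmt_network lv hw ≠ "--auto-nic-mappings" := by
  intro h
  have h2 := congrArg String.toList h
  simp [fmt_network] at h2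

theorem network_args_no_auto (nics : List (List (String × String))) (names : List String)
    (na : List String) (h : network_args_py nics names = some na) :
    ∀ x ∈ na, x ≠ "--auto-nic-mappings" := by
  induction names generalizing na with
  | nil =>
    simp only [network_args_py, Option.some.injEq] at h
    simp [← h]
  | cons n ns ih =>
    unfold network_args_py at h
    repeat' split at h
    all_goals cases h
    intro x hx
    rcases hx with _ | ⟨_, hx⟩
    · decide
    · rcases hx with _ | ⟨_, hx⟩
      · exact fmt_ne_auto _ _
      · exact ih _ (by assumption) x hx

theorem loop2_copy (nics : List (List (String × String))) (xs : List String)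
    (hxs : ∀ x ∈ xs, x ≠ "--auto-nic-mappings") :
    ∀ ys ins acc, loop2_A nics (xs ++ ys) ins acc = loop2_A nics ys ins (acc ++ xs) := by
  induction xs with
  | nil => intro ys ins acc; simp
  | cons x xs ih =>
    intro ys ins acc
    have hx : x ≠ "--auto-nic-mappings" := hxs x (by simp)
    simp only [List.cons_append, loop2_A, if_neg hx]
    rw [ih (fun y hy => hxs y (by simp [hy])) ys ins (acc ++ [x])]
    simp

theorem diff_eq_nil (l : List String) (ins : PySem.Set String)
    (h : ∀ n ∈ l, n ∈ ins) : PySem.Set.diff (PySem.Set.ofList l) ins = [] := by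
  rw [List.eq_nil_iff_forall_not_mem]
  intro x hx
  rw [PySem.Set.mem_diff] at hx
  exact hx.2 (h x ((PySem.Set.mem_ofList l x).mp hx.1))

-- one-step unfolding equations (all definitional)
theorem expAll_manual (nics : List (List (String × String))) (v : String) (rest : List String) :
    expAll nics ("--nic-mappings" :: v :: rest) =
      match network_args_py nics (get_nic_names_py v) with
      | none => none
      | some na => (expAll nics rest).map (na ++ ·) := rfl

theorem expAll_plain (nics : List (List (String × String))) (arg : String) (rest : List String)
    (ha : arg ≠ "--nic-mappings") :
    expAll nics (arg :: rest) = (expAll nics rest).map (arg :: ·) := by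
  rw [expAll.eq_def]; simp [ha]

theorem loop1_manual (nics : List (List (String × String))) (v : String) (rest : List String)
    (ins : PySem.Set String) (acc : List String) :
    loop1_A nics ("--nic-mappings" :: v :: rest) ins acc =
      match network_args_py nics (get_nic_names_py v) with
      | none => none
      | some na =>
        loop1_A nics rest (PySem.Set.union ins (PySem.Set.ofList (get_nic_names_py v))) (acc ++ na) := rfl

theorem loop1_plain (nics : List (List (String × String))) (arg : String) (rest : List String)
    (ins : PySem.Set String) (acc : List String) (ha : arg ≠ "--nic-mappings") :
    loop1_A nics (arg :: rest) ins acc = loop1_A nics rest ins (acc ++ [arg]) := by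
  rw [loop1_A.eq_def]; simp [ha]

theorem loop2_auto (nics : List (List (String × String))) (rest : List String)
    (ins : PySem.Set String) (acc : List String) :
    loop2_A nics ("--auto-nic-mappings" :: rest) ins acc =
      match all_nic_names_py nics with
      | none => none
      | some allN =>
        match network_args_py nics (PySem.Set.diff (PySem.Set.ofList allN) ins) with
        | none => none
        | some na =>
          loop2_A nics rest (PySem.Set.union ins (PySem.Set.diff (PySem.Set.ofList allN) ins)) (acc ++ na) := rfl

theorem loop2_plain (nics : List (List (String × String))) (arg : String) (rest : List String)
    (ins : PySem.Set String) (acc : List String) (ha : arg ≠ "--auto-nic-mappings") :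
    loop2_A nics (arg :: rest) ins acc = loop2_A nics rest ins (acc ++ [arg]) := by
  rw [loop2_A.eq_def]; simp [ha]

theorem pass1_manual (v : String) (rest : List String) (ins : PySem.Set String) :
    pass1_B ("--nic-mappings" :: v :: rest) false ins =
      pass1_B rest false (PySem.Set.union ins (PySem.Set.ofList (get_nic_names_py v))) := rfl

theorem pass1_plain (arg : String) (rest : List String) (ins : PySem.Set String)
    (ha : arg ≠ "--nic-mappings") :
    pass1_B (arg :: rest) false ins = pass1_B rest false ins := by
  rw [pass1_B.eq_def]; simp [ha]

theorem pass2_manual (nics : List (List (String × String))) (ins : PySem.Set String)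
    (v : String) (rest : List String) (d : Bool) (o : List String) :
    pass2_B nics ins ("--nic-mappings" :: v :: rest) false d o =
      match network_args_py nics (get_nic_names_py v) with
      | none => none
      | some na => pass2_B nics ins rest false d (o ++ na) := rfl

theorem pass2_auto_done (nics : List (List (String × String))) (ins : PySem.Set String)
    (rest : List String) (o : List String) :
    pass2_B nics ins ("--auto-nic-mappings" :: rest) false true o =
      pass2_B nics ins rest false true o := rfl

theorem pass2_auto_new (nics : List (List (String × String))) (ins : PySem.Set String)
    (rest : List String) (o : List String) :
    pass2_B nics ins ("--auto-nic-mappings" :: rest) false false o =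
      match all_nic_names_py nics with
      | none => none
      | some allN =>
        match network_args_py nics (PySem.Set.diff (PySem.Set.ofList allN) ins) with
        | none => none
        | some na => pass2_B nics ins rest false true (o ++ na) := rfl

theorem pass2_plain (nics : List (List (String × String))) (ins : PySem.Set String)
    (arg : String) (rest : List String) (d : Bool) (o : List String)
    (ha : arg ≠ "--nic-mappings") (hau : arg ≠ "--auto-nic-mappings") :
    pass2_B nics ins (arg :: rest) false d o = pass2_B nics ins rest false d (o ++ [arg]) := by
  rw [pass2_B.eq_def]; simp [ha, hau]

theorem L1a (nics : List (List (String × String))) :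
    (args : List String) → expAll nics args = none →
      ∀ ins acc, loop1_A nics args ins acc = none
  | [], h => by simp [expAll] at h
  | [arg], h => by
    intro ins acc
    by_cases ha : arg = "--nic-mappings"
    · subst ha; rfl
    · simp [expAll, if_neg ha] at h
  | arg :: v :: rest', h => by
    intro ins acc
    by_cases ha : arg = "--nic-mappings"
    · subst ha
      rw [expAll_manual] at h
      rw [loop1_manual]
      cases hna : network_args_py nics (get_nic_names_py v) with
      | none => rfl
      | some na =>
        rw [hna] at h
        simp only [Option.map_eq_none_iff] at h
        exact L1a nics rest' h _ _
    · rw [expAll_plain nics arg (v :: rest') ha, Option.map_eq_none_iff] at h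
      rw [loop1_plain nics arg (v :: rest') ins acc ha]
      exact L1a nics (v :: rest') h _ _

theorem L1b (nics : List (List (String × String))) :
    (args : List String) → (cm : List String) → expAll nics args = some cm →
      ∀ ins acc, ∃ s, loop1_A nics args ins acc = some (s, acc ++ cm) ∧
        pass1_B args false ins = some s
  | [], cm, h => by
    intro ins acc
    simp only [expAll, Option.some.injEq] at h
    subst h
    exact ⟨ins, by simp [loop1_A], rfl⟩
  | [arg], cm, h => by
    intro ins acc
    by_cases ha : arg = "--nic-mappings"
    · simp [expAll, ha] at h
    · rw [expAll_plain nics arg [] ha] at h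
      have hcm : cm = [arg] := by simpa [expAll] using h.symm
      subst hcm
      refine ⟨ins, ?_, ?_⟩
      · rw [loop1_plain nics arg [] ins acc ha]; rfl
      · rw [pass1_plain arg [] ins ha]
        rfl
  | arg :: v :: rest', cm, h => by
    intro ins acc
    by_cases ha : arg = "--nic-mappings"
    · subst ha
      rw [expAll_manual] at h
      cases hna : network_args_py nics (get_nic_names_py v) with
      | none => rw [hna] at h; exact absurd h (by simp)
      | some na =>
        rw [hna] at h
        rw [Option.map_eq_some_iff] at h
        obtain ⟨cm', hcm', rfl⟩ := h
        obtain ⟨s, h1, h2⟩ := L1b nics rest' cm' hcm'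
          (PySem.Set.union ins (PySem.Set.ofList (get_nic_names_py v))) (acc ++ na)
        refine ⟨s, ?_, ?_⟩
        · rw [loop1_manual]
          simp only [hna]
          rw [h1, List.append_assoc]
        · rw [pass1_manual]
          exact h2
    · rw [expAll_plain nics arg (v :: rest') ha, Option.map_eq_some_iff] at h
      obtain ⟨cm', hcm', rfl⟩ := h
      obtain ⟨s, h1, h2⟩ := L1b nics (v :: rest') cm' hcm' ins (acc ++ [arg])
      refine ⟨s, ?_, ?_⟩
      · rw [loop1_plain nics arg (v :: rest') ins acc ha, h1]
        simp
      · rw [pass1_plain arg (v :: rest') ins ha]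
        exact h2

theorem L2done (nics : List (List (String × String))) (allN : List String)
    (hall : all_nic_names_py nics = some allN) :
    (args : List String) → (cm : List String) → expAll nics args = some cm →
      ∀ insA insB acc, (∀ n ∈ allN, n ∈ insA) →
        loop2_A nics cm insA acc = pass2_B nics insB args false true acc
  | [], cm, h => by
    intro insA insB acc _
    simp only [expAll, Option.some.injEq] at h
    subst h
    rfl
  | [arg], cm, h => by
    intro insA insB acc hins
    by_cases ha : arg = "--nic-mappings"
    · simp [expAll, ha] at h
    · rw [expAll_plain nics arg [] ha] at h
      have hcm : cm = [arg] := by simpa [expAll] using h.symm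
      subst hcm
      by_cases hau : arg = "--auto-nic-mappings"
      · subst hau
        rw [loop2_auto]
        simp only [hall, diff_eq_nil allN insA hins]
        rw [show network_args_py nics [] = some [] from rfl]
        rw [pass2_auto_done]
        simp [loop2_A, pass2_B]
      · rw [loop2_plain nics arg [] insA acc hau, pass2_plain nics insB arg [] true acc ha hau]
        rfl
  | arg :: v :: rest', cm, h => by
    intro insA insB acc hins
    by_cases ha : arg = "--nic-mappings"
    · subst ha
      rw [expAll_manual] at h
      cases hna : network_args_py nics (get_nic_names_py v) with
      | none => rw [hna] at h; exact absurd h (by simp)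
      | some na =>
        rw [hna, Option.map_eq_some_iff] at h
        obtain ⟨cm', hcm', rfl⟩ := h
        rw [loop2_copy nics na (network_args_no_auto nics _ na hna) cm' insA acc]
        rw [pass2_manual]
        simp only [hna]
        exact L2done nics allN hall rest' cm' hcm' insA insB (acc ++ na) hins
    · rw [expAll_plain nics arg (v :: rest') ha, Option.map_eq_some_iff] at h
      obtain ⟨cm', hcm', rfl⟩ := h
      by_cases hau : arg = "--auto-nic-mappings"
      · subst hau
        rw [loop2_auto]
        simp only [hall, diff_eq_nil allN insA hins]
        rw [show network_args_py nics [] = some [] from rfl]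
        rw [pass2_auto_done]
        have := L2done nics allN hall (v :: rest') cm' hcm'
          (PySem.Set.union insA (PySem.Set.diff (PySem.Set.ofList allN) insA)) insB acc
          (fun n hn => by rw [PySem.Set.mem_union]; exact Or.inl (hins n hn))
        rw [diff_eq_nil allN insA hins] at this
        simpa using this
      · rw [loop2_plain nics arg cm' insA acc hau]
        rw [pass2_plain nics insB arg (v :: rest') true acc ha hau]
        exact L2done nics allN hall (v :: rest') cm' hcm' insA insB (acc ++ [arg]) hins

theorem L2 (nics : List (List (String × String))) :
    (args : List String) → (cm : List String) → expAll nics args = some cm →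
      ∀ ins acc, loop2_A nics cm ins acc = pass2_B nics ins args false false acc
  | [], cm, h => by
    intro ins acc
    simp only [expAll, Option.some.injEq] at h
    subst h
    rfl
  | [arg], cm, h => by
    intro ins acc
    by_cases ha : arg = "--nic-mappings"
    · simp [expAll, ha] at h
    · rw [expAll_plain nics arg [] ha] at h
      have hcm : cm = [arg] := by simpa [expAll] using h.symm
      subst hcm
      by_cases hau : arg = "--auto-nic-mappings"
      · subst hau
        rw [loop2_auto, pass2_auto_new]
        cases hall : all_nic_names_py nics with
        | none => rfl
        | some allN =>
          simp only []
          cases hna : network_args_py nics (PySem.Set.diff (PySem.Set.ofList allN) ins) with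
          | none => rfl
          | some na => rfl
      · rw [loop2_plain nics arg [] ins acc hau, pass2_plain nics ins arg [] false acc ha hau]
        rfl
  | arg :: v :: rest', cm, h => by
    intro ins acc
    by_cases ha : arg = "--nic-mappings"
    · subst ha
      rw [expAll_manual] at h
      cases hna : network_args_py nics (get_nic_names_py v) with
      | none => rw [hna] at h; exact absurd h (by simp)
      | some na =>
        rw [hna, Option.map_eq_some_iff] at h
        obtain ⟨cm', hcm', rfl⟩ := h
        rw [loop2_copy nics na (network_args_no_auto nics _ na hna) cm' ins acc]
        rw [pass2_manual]
        simp only [hna]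
        exact L2 nics rest' cm' hcm' ins (acc ++ na)
    · rw [expAll_plain nics arg (v :: rest') ha, Option.map_eq_some_iff] at h
      obtain ⟨cm', hcm', rfl⟩ := h
      by_cases hau : arg = "--auto-nic-mappings"
      · subst hau
        rw [loop2_auto, pass2_auto_new]
        cases hall : all_nic_names_py nics with
        | none => rfl
        | some allN =>
          simp only []
          cases hna : network_args_py nics (PySem.Set.diff (PySem.Set.ofList allN) ins) with
          | none => rfl
          | some na =>
            have habs : ∀ n ∈ allN, n ∈ PySem.Set.union ins (PySem.Set.diff (PySem.Set.ofList allN) ins) := by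
              intro n hn
              rw [PySem.Set.mem_union]
              by_cases hni : n ∈ ins
              · exact Or.inl hni
              · exact Or.inr (by rw [PySem.Set.mem_diff]; exact ⟨(PySem.Set.mem_ofList allN n).mpr hn, hni⟩)
            exact L2done nics allN hall (v :: rest') cm' hcm' _ ins (acc ++ na) habs
      · rw [loop2_plain nics arg cm' ins acc hau]
        rw [pass2_plain nics ins arg (v :: rest') false acc ha hau]
        exact L2 nics (v :: rest') cm' hcm' ins (acc ++ [arg])

theorem L2none (nics : List (List (String × String))) :
    (args : List String) → expAll nics args = none →
      (∃ s i0, pass1_B args false i0 = some s) →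
      ∀ ins acc done, pass2_B nics ins args false done acc = none
  | [], h => by simp [expAll] at h
  | [arg], h => by
    rintro ⟨s, i0, hp⟩ ins acc done
    by_cases ha : arg = "--nic-mappings"
    · subst ha; exact absurd hp (by simp [pass1_B])
    · simp [expAll, if_neg ha] at h
  | arg :: v :: rest', h => by
    rintro ⟨s, i0, hp⟩ ins acc done
    by_cases ha : arg = "--nic-mappings"
    · subst ha
      rw [expAll_manual] at h
      rw [show pass2_B nics ins ("--nic-mappings" :: v :: rest') false done acc =
        match network_args_py nics (get_nic_names_py v) with
        | none => none
        | some na => pass2_B nics ins rest' false done (acc ++ na) from rfl]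
      cases hna : network_args_py nics (get_nic_names_py v) with
      | none => rfl
      | some na =>
        rw [hna] at h
        simp only [Option.map_eq_none_iff] at h
        have hp' : pass1_B rest' false
            (PySem.Set.union i0 (PySem.Set.ofList (get_nic_names_py v))) = some s := hp
        exact L2none nics rest' h ⟨s, _, hp'⟩ ins (acc ++ na) done
    · rw [expAll_plain nics arg (v :: rest') ha, Option.map_eq_none_iff] at h
      have hp' : pass1_B (v :: rest') false i0 = some s := by
        rw [pass1_plain arg (v :: rest') i0 ha] at hp
        exact hp
      by_cases hau : arg = "--auto-nic-mappings"
      · subst hau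
        cases done with
        | true =>
          rw [pass2_auto_done]
          exact L2none nics (v :: rest') h ⟨s, i0, hp'⟩ ins acc true
        | false =>
          rw [pass2_auto_new]
          cases hall : all_nic_names_py nics with
          | none => rfl
          | some allN =>
            simp only []
            cases hna : network_args_py nics (PySem.Set.diff (PySem.Set.ofList allN) ins) with
            | none => rfl
            | some na =>
              exact L2none nics (v :: rest') h ⟨s, i0, hp'⟩ ins (acc ++ na) true
      · rw [pass2_plain nics ins arg (v :: rest') done acc ha hau]
        exact L2none nics (v :: rest') h ⟨s, i0, hp'⟩ ins (acc ++ [arg]) done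

-- ===== VERDICT (by name: the statement is the Claim_ definition above) =====
theorem convert_nic_mappings_args_py_spec : Claim_equal_convert_nic_mappings_args_py := by
  intro args nics _dom _pre
  unfold Spec_convert_nic_mappings_args_py
  unfold convert_nic_mappings_args_py convert_nic_mappings_args_py_alt
  cases h2 : expAll nics args with
  | none =>
    rw [L1a nics args h2 PySem.Set.empty []]
    cases h1 : pass1_B args false PySem.Set.empty with
    | none => rfl
    | some ins =>
      show ([] : List String) = (pass2_B nics ins args false false []).getD []
      rw [L2none nics args h2 ⟨ins, PySem.Set.empty, h1⟩ ins [] false]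
      rfl
  | some cm =>
    obtain ⟨s, ha, hb⟩ := L1b nics args cm h2 PySem.Set.empty []
    rw [ha, hb]
    simp only [List.nil_append]
    exact congrArg (fun o => o.getD []) (L2 nics args cm h2 s [])
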